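-- pv_equiv track=rewrite | github.com/Progambler227788/CP-CompetativeProgramming | 800 Ratings/1766.py | extremeRound
-- ===== SOURCE A (Python) =====
-- def extremeRound(n):
--     count = 0
--     while n>0:
--           dig = n%10
--           if dig>=1:
--                count+=1
--           if count==2:
--              return False
--           n//=10
--     return True
-- ===== SOURCE B (Python) =====
-- def extremeRound(n):
--     if n <= 0:
--         return True
--     while n % 10 == 0:
--         n //= 10
--     return n < 10
-- ===== Notes on version B (the rewrite author's own statement) =====
-- stated objective: simpler
-- what changed: Instead of counting nonzero digits with a counter and early exit, B strips trailing zeros in a loop and then checks whether the remaining number is a single digit (n < 10).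
import Mathlib
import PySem

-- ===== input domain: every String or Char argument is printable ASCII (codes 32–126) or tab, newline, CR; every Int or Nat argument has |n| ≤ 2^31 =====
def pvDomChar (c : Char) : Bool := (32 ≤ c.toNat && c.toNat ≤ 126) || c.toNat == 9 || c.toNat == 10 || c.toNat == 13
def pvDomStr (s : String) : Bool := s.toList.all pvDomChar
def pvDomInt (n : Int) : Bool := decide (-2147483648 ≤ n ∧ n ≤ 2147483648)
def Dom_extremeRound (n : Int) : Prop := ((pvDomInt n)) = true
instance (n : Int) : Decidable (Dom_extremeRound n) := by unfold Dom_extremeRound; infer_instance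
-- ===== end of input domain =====

-- B replaces A's nonzero-digit counter (with early exit) by stripping trailing zeros
-- and checking the remainder is a single digit: simpler, no counter state.


-- helper lemmas cited by both ports' termination proofs: Python's %/// with the
-- positive divisor 10 are Lean's emod/ediv
theorem pymod10 (n : Int) : PySem.Int.mod n 10 = n % 10 := by
  rw [PySem.Int.mod, Int.fmod_eq_emod]; simp

theorem pydiv10 (n : Int) : PySem.Int.floordiv n 10 = n / 10 := by
  rw [PySem.Int.floordiv, Int.fdiv_eq_ediv]; simp

-- ===== PORT A =====
-- the 'while n>0' loop of A, carrying the counter state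
def extremeRoundLoop (n : Int) (count : Int) : Bool :=
  if 0 < n then
    let dig := PySem.Int.mod n 10
    let count' := if 1 ≤ dig then count + 1 else count
    if count' = 2 then false
    else extremeRoundLoop (PySem.Int.floordiv n 10) count'
  else true
termination_by n.toNat
decreasing_by rw [pydiv10]; omega

def extremeRound (n : Int) : Bool := extremeRoundLoop n 0

-- ===== PORT B =====
-- the 'while n % 10 == 0' loop of B; only ever entered with 0 < n (the hypothesis makes it total)
def extremeRoundAltLoop (n : Int) (h : 0 < n) : Bool :=
  if hm : PySem.Int.mod n 10 = 0 then
    extremeRoundAltLoop (PySem.Int.floordiv n 10)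
      (by rw [pymod10] at hm; rw [pydiv10]; omega)
  else decide (n < 10)
termination_by n.toNat
decreasing_by rw [pymod10] at hm; rw [pydiv10]; omega

def extremeRound_alt (n : Int) : Bool :=
  if h : n ≤ 0 then true
  else extremeRoundAltLoop n (by omega)

-- ===== PRECONDITION & SPEC =====
def Spec_extremeRound (n : Int) (out : Bool) : Prop := out = extremeRound_alt n
instance (n : Int) (out : Bool) : Decidable (Spec_extremeRound n out) := by unfold Spec_extremeRound; infer_instance

-- ===== CLAIM (what is proved, stated in full; the proofs are below) =====
def Claim_equal_extremeRound : Prop := ∀ (n : Int), Dom_extremeRound n → Spec_extremeRound n (extremeRound n)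

-- ===== LEMMAS AND PROOFS =====

-- number of nonzero decimal digits of a natural number
def nzDigits (m : Nat) : Nat :=
  if m = 0 then 0
  else (if m % 10 = 0 then 0 else 1) + nzDigits (m / 10)
termination_by m
decreasing_by omega

theorem nzDigits_eq_zero_iff (m : Nat) : nzDigits m = 0 ↔ m = 0 := by
  induction m using Nat.strong_induction_on with
  | _ m ih =>
    rw [nzDigits]
    split
    · simp [*]
    · rename_i hm
      rcases Nat.eq_zero_or_pos (m % 10) with h10 | h10
      · have := ih (m / 10) (by omega)
        simp [h10, this]
        omega
      · simp; omega

theorem nzDigits_succ (m : Nat) (h : m ≠ 0) :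
    nzDigits m = (if m % 10 = 0 then 0 else 1) + nzDigits (m / 10) := by
  rw [nzDigits]; simp [h]

theorem extremeRoundLoop_eq (m : Nat) :
    ∀ (n c : Int), n.toNat = m → (c = 0 ∨ c = 1) →
      extremeRoundLoop n c = decide (nzDigits n.toNat + c.toNat ≤ 1) := by
  induction m using Nat.strong_induction_on with
  | _ m ih =>
    intro n c hm hc
    rw [extremeRoundLoop]
    simp only [pymod10, pydiv10]
    split_ifs with hpos hd h2 h3
    · -- 1 ≤ n % 10, count' = c+1 = 2, returns false
      rw [nzDigits_succ n.toNat (by omega), if_neg (show n.toNat % 10 ≠ 0 by omega)]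
      symm
      rw [decide_eq_false_iff_not]
      omega
    · -- 1 ≤ n % 10, c+1 ≠ 2 : recurse with count c+1
      rw [ih (n / 10).toNat (by omega) (n / 10) (c + 1) rfl (by omega),
        show ((n:Int) / 10).toNat = n.toNat / 10 by omega,
        nzDigits_succ n.toNat (by omega), if_neg (show n.toNat % 10 ≠ 0 by omega)]
      simp only [decide_eq_decide]
      omega
    · -- n % 10 < 1 and c = 2 : impossible since c ∈ {0,1}
      omega
    · -- n % 10 < 1 : recurse with count c
      rw [ih (n / 10).toNat (by omega) (n / 10) c rfl hc,
        show ((n:Int) / 10).toNat = n.toNat / 10 by omega,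
        nzDigits_succ n.toNat (by omega), if_pos (show n.toNat % 10 = 0 by omega)]
      simp only [decide_eq_decide]
      omega
    · -- ¬ 0 < n : loop exits with True
      rw [show n.toNat = 0 by omega,
        show nzDigits 0 = 0 from by rw [nzDigits]; simp]
      symm
      rw [decide_eq_true_eq]
      omega

theorem extremeRoundAltLoop_eq (m : Nat) :
    ∀ (n : Int) (h : 0 < n), n.toNat = m →
      extremeRoundAltLoop n h = decide (nzDigits n.toNat ≤ 1) := by
  induction m using Nat.strong_induction_on with
  | _ m ih =>
    intro n h hm
    rw [extremeRoundAltLoop]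
    split_ifs with h10
    · -- trailing zero: strip and recurse
      have h10' : n % 10 = 0 := by rw [pymod10] at h10; exact h10
      rw [ih (PySem.Int.floordiv n 10).toNat
            (by rw [pydiv10]; omega) _ _ rfl]
      have hdiv : (PySem.Int.floordiv n 10).toNat = n.toNat / 10 := by
        rw [pydiv10]; omega
      rw [hdiv, show nzDigits n.toNat = nzDigits (n.toNat / 10) from by
        rw [nzDigits]
        simp [show n.toNat ≠ 0 by omega, show n.toNat % 10 = 0 by omega]]
    · -- last digit nonzero: single digit iff n < 10
      have h10' : n.toNat % 10 ≠ 0 := by rw [pymod10] at h10; omega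
      rw [nzDigits]
      simp only [if_neg (show n.toNat ≠ 0 by omega), if_neg h10']
      have hz : nzDigits (n.toNat / 10) = 0 ↔ n.toNat / 10 = 0 := nzDigits_eq_zero_iff _
      by_cases hlt : n < 10
      · have : nzDigits (n.toNat / 10) = 0 := by rw [hz]; omega
        simp [hlt, this]
      · have : ¬ (1 + nzDigits (n.toNat / 10) ≤ 1) := by
          intro hle
          have h0 : nzDigits (n.toNat / 10) = 0 := by omega
          rw [hz] at h0
          omega
        simp [hlt, this]

-- ===== VERDICT (by name: the statement is the Claim_ definition above) =====
theorem extremeRound_spec : Claim_equal_extremeRound := by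
  intro n _
  unfold Spec_extremeRound extremeRound extremeRound_alt
  by_cases hle : n ≤ 0
  · rw [dif_pos hle, extremeRoundLoop]
    simp [show ¬ 0 < n by omega]
  · rw [dif_neg hle, extremeRoundLoop_eq n.toNat n 0 rfl (Or.inl rfl),
      extremeRoundAltLoop_eq n.toNat n (by omega) rfl]
    simp
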